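-- pv_equiv track=rewrite | github.com/seanlab3/algorithms3 | strings/valid_string_after_subs.py | valid_subs
-- ===== SOURCE A (Python) =====
-- def valid_subs(S):
--     stack = []
--     for char in S:
--         if char == 'c':
--             if stack[-2:] != ['a', 'b']:
--                 return False
--             stack.pop()
--             stack.pop()
--         else:
--             stack.append(char)
--     return not stack
-- ===== SOURCE B (Python) =====
-- def valid_subs(S):
--     while 'abc' in S:
--         S = S.replace('abc', '')
--     return S == ''
-- ===== Notes on version B (the rewrite author's own statement) =====
-- stated objective: simpler
-- what changed: Replaces the single-pass stack simulation with repeated whole-string removal of the fixed three-letter pattern (while the pattern occurs as a substring, delete all its occurrences via str.replace), then checks that the string is empty; deleting a fixed pattern is confluent, so the normal form agrees with the stack check.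
import Mathlib
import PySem

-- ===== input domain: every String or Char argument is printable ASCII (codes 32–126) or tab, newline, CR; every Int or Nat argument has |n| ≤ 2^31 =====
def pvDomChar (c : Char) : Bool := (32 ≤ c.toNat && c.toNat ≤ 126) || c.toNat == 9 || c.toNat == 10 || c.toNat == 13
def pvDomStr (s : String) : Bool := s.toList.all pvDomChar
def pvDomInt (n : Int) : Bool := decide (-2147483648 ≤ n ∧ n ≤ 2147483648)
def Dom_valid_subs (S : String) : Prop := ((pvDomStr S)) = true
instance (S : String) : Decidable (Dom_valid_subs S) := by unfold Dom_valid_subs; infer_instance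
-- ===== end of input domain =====

-- B replaces A's single-pass stack simulation by repeated whole-string removal of the fixed
-- three-letter pattern followed by an emptiness check (simpler formulation; not faster).


-- ===== PORT A =====
-- the Python stack (append/pop at the right end) is kept REVERSED: append = cons, so
-- 'stack[-2:] != ["a","b"]' is 'stack.take 2 ≠ ["b","a"]' and the two pops are 'drop 2'.
def pvGoA : List Char → List Char → Bool
  | stack, [] => stack.isEmpty                          -- return not stack
  | stack, ch :: rest =>
    if ch = 'c' then
      if stack.take 2 ≠ ['b', 'a'] then false           -- if stack[-2:] != ['a','b']: return False
      else pvGoA (stack.drop 2) rest            -- stack.pop(); stack.pop()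
    else pvGoA (ch :: stack) rest               -- stack.append(char)

def valid_subs (S : String) : Bool := pvGoA [] S.toList

-- ===== PORT B =====
-- Proof-side characterisation of S.replace('abc','')' needed by the port's own
-- termination argument (cited by name in decreasing_by); not part of B's algorithm.
def pvRepl : List Char → List Char
  | c :: b :: d :: t =>
    if c = 'a' ∧ b = 'b' ∧ d = 'c' then pvRepl t else c :: pvRepl (b :: d :: t)
  | l => l

theorem pvRepl_go_eq : ∀ (fuel : Nat) (l acc : List Char), l.length ≤ fuel →
    PySem.Chars.replace.go ['a', 'b', 'c'] [] fuel l acc = acc.reverse ++ pvRepl l := by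
  intro fuel
  induction fuel with
  | zero =>
    intro l acc h
    cases l with
    | nil => simp [PySem.Chars.replace.go, pvRepl]
    | cons c t => simp at h
  | succ n ih =>
    intro l acc h
    match l with
    | [] => simp [PySem.Chars.replace.go, pvRepl]
    | [c] =>
      rw [PySem.Chars.replace.go, if_neg (by simp [List.isPrefixOf])]
      rw [ih [] (c :: acc) (by simp)]
      simp [pvRepl]
    | [c, b] =>
      rw [PySem.Chars.replace.go, if_neg (by simp [List.isPrefixOf])]
      rw [ih [b] (c :: acc) (by simp only [List.length_cons, List.length_nil] at h ⊢; omega)]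
      simp [pvRepl]
    | c :: b :: d :: t =>
      by_cases hcond : c = 'a' ∧ b = 'b' ∧ d = 'c'
      · obtain ⟨rfl, rfl, rfl⟩ := hcond
        rw [PySem.Chars.replace.go, if_pos (by simp [List.isPrefixOf])]
        simp only [List.length_cons, List.length_nil, List.drop_succ_cons, List.drop_zero,
          List.reverse_nil, List.nil_append]
        simp only [List.length_cons] at h
        rw [ih t acc (by omega)]
        simp [pvRepl]
      · rw [PySem.Chars.replace.go, if_neg (by simp [List.isPrefixOf]; tauto)]
        simp only [List.length_cons] at h
        rw [ih (b :: d :: t) (c :: acc) (by simp; omega)]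
        rw [show pvRepl (c :: b :: d :: t) = c :: pvRepl (b :: d :: t) from by
          rw [pvRepl, if_neg hcond]]
        simp

theorem replace_abc (l : List Char) :
    PySem.Chars.replace l ['a', 'b', 'c'] [] = pvRepl l := by
  rw [PySem.Chars.replace]
  rw [if_neg (by simp)]
  exact pvRepl_go_eq l.length l [] le_rfl

theorem pvRepl_len : ∀ (n : Nat) (l : List Char), l.length ≤ n →
    (pvRepl l).length ≤ l.length ∧
      (['a', 'b', 'c'] <:+: l → (pvRepl l).length < l.length) := by
  intro n
  induction n with
  | zero =>
    intro l h
    cases l with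
    | nil =>
      refine ⟨le_rfl, fun hinf => ?_⟩
      have := hinf.length_le
      simp at this
    | cons c t => simp at h
  | succ n ih =>
    intro l h
    match l with
    | [] =>
      refine ⟨le_rfl, fun hinf => ?_⟩
      have := hinf.length_le; simp at this
    | [c] =>
      refine ⟨le_rfl, fun hinf => ?_⟩
      have := hinf.length_le; simp at this
    | [c, b] =>
      refine ⟨le_rfl, fun hinf => ?_⟩
      have := hinf.length_le; simp at this
    | c :: b :: d :: t =>
      simp only [List.length_cons] at h
      by_cases hcond : c = 'a' ∧ b = 'b' ∧ d = 'c'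
      · obtain ⟨rfl, rfl, rfl⟩ := hcond
        have ht := ih t (by omega)
        rw [show pvRepl ('a' :: 'b' :: 'c' :: t) = pvRepl t from by rw [pvRepl, if_pos ⟨rfl, rfl, rfl⟩]]
        constructor
        · simp only [List.length_cons]; omega
        · intro _; simp only [List.length_cons]; omega
      · have ht := ih (b :: d :: t) (by simp; omega)
        rw [show pvRepl (c :: b :: d :: t) = c :: pvRepl (b :: d :: t) from by
          rw [pvRepl, if_neg hcond]]
        constructor
        · have h1 := ht.1
          simp only [List.length_cons] at h1 ⊢
          omega
        · intro hinf
          obtain ⟨s, t2, hs⟩ := hinf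
          cases s with
          | nil =>
            simp only [List.nil_append, List.cons_append, List.cons.injEq] at hs
            exact absurd ⟨hs.1.symm, hs.2.1.symm, hs.2.2.1.symm⟩ hcond
          | cons x s' =>
            simp only [List.cons_append, List.cons.injEq] at hs
            have hin : ['a', 'b', 'c'] <:+: (b :: d :: t) := ⟨s', t2, hs.2⟩
            have hlt := ht.2 hin
            simp only [List.length_cons] at hlt ⊢
            omega

theorem pvRepl_length_lt (l : List Char) (h : ['a', 'b', 'c'] <:+: l) :
    (pvRepl l).length < l.length :=
  (pvRepl_len l.length l le_rfl).2 h

-- while 'abc' in S: S = S.replace('abc', '')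
def pvLoopB (S : String) : String :=
  if PySem.Str.isIn "abc" S then pvLoopB (PySem.Str.replace S "abc" "") else S
termination_by S.toList.length
decreasing_by
  rename_i h
  have h' : ("abc".toList) <:+: S.toList := (PySem.Str.isIn_iff_infix _ _).mp h
  simp only [PySem.Str.toList_replace]
  calc (PySem.Chars.replace S.toList "abc".toList "".toList).length
      = (pvRepl S.toList).length := by
        rw [show ("abc".toList) = ['a', 'b', 'c'] from rfl,
          show ("".toList) = ([] : List Char) from rfl, replace_abc]
    _ < S.toList.length := pvRepl_length_lt S.toList (by
        rw [show ("abc".toList) = ['a', 'b', 'c'] from rfl] at h'; exact h')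

def valid_subs_alt (S : String) : Bool := pvLoopB S == ""     -- return S == ''

-- ===== PRECONDITION & SPEC =====
def Spec_valid_subs (S : String) (out : Bool) : Prop := out = valid_subs_alt S
instance (S : String) (out : Bool) : Decidable (Spec_valid_subs S out) := by unfold Spec_valid_subs; infer_instance

-- ===== CLAIM (what is proved, stated in full; the proofs are below) =====
def Claim_equal_valid_subs : Prop := ∀ (S : String), Dom_valid_subs S → Spec_valid_subs S (valid_subs S)

-- ===== LEMMAS AND PROOFS =====

-- deleting one "abc" anywhere leaves A's verdict unchanged
theorem go_insert (u : List Char) : ∀ (v stack : List Char),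
    pvGoA stack (u ++ 'a' :: 'b' :: 'c' :: v) = pvGoA stack (u ++ v) := by
  induction u with
  | nil => intro v stack; simp [pvGoA, List.take, List.drop]
  | cons x u' ih =>
    intro v stack
    simp only [List.cons_append, pvGoA]
    split_ifs with h1 h2 <;> first | rfl | apply ih

-- A's verdict is invariant under one whole-string replace pass
theorem go_repl : ∀ (n : Nat) (l : List Char), l.length ≤ n → ∀ (u : List Char),
    pvGoA [] (u ++ pvRepl l) = pvGoA [] (u ++ l) := by
  intro n
  induction n with
  | zero =>
    intro l h u
    cases l with
    | nil => rfl
    | cons c t => simp at h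
  | succ n ih =>
    intro l h u
    match l with
    | [] => rfl
    | [c] => rfl
    | [c, b] => rfl
    | c :: b :: d :: t =>
      simp only [List.length_cons] at h
      by_cases hcond : c = 'a' ∧ b = 'b' ∧ d = 'c'
      · obtain ⟨rfl, rfl, rfl⟩ := hcond
        rw [show pvRepl ('a' :: 'b' :: 'c' :: t) = pvRepl t from by rw [pvRepl, if_pos ⟨rfl, rfl, rfl⟩]]
        rw [ih t (by omega) u, go_insert u t []]
      · rw [show pvRepl (c :: b :: d :: t) = c :: pvRepl (b :: d :: t) from by
          rw [pvRepl, if_neg hcond]]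
        have e1 : u ++ c :: pvRepl (b :: d :: t) = (u ++ [c]) ++ pvRepl (b :: d :: t) := by simp
        have e2 : u ++ c :: b :: d :: t = (u ++ [c]) ++ (b :: d :: t) := by simp
        rw [e1, e2, ih (b :: d :: t) (by simp; omega) (u ++ [c])]

-- on a string with no "abc", A's verdict is plain emptiness
theorem go_no_abc : ∀ (l stack : List Char),
    ¬ (['a', 'b', 'c'] <:+: (stack.reverse ++ l)) →
    pvGoA stack l = (stack.reverse ++ l).isEmpty := by
  intro l
  induction l with
  | nil =>
    intro stack _
    show stack.isEmpty = _
    cases stack <;> simp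
  | cons ch rest ih =>
    intro stack h
    simp only [pvGoA]
    by_cases hc : ch = 'c'
    · subst hc
      by_cases ht : stack.take 2 = ['b', 'a']
      · exfalso
        have hshape : ∃ t, stack = 'b' :: 'a' :: t := by
          cases stack with
          | nil => simp at ht
          | cons s1 s2 =>
            cases s2 with
            | nil => simp [List.take] at ht
            | cons s2h s2t =>
              simp [List.take] at ht
              exact ⟨s2t, by rw [ht.1, ht.2]⟩
        obtain ⟨t, rfl⟩ := hshape
        exact h ⟨t.reverse, rest, by simp⟩
      · rw [if_pos rfl, if_pos ht]
        have : stack.reverse ++ 'c' :: rest ≠ [] := by simp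
        simp [this]
    · rw [if_neg hc]
      have heq : (ch :: stack).reverse ++ rest = stack.reverse ++ ch :: rest := by simp
      rw [ih (ch :: stack) (by rw [heq]; exact h), heq]

theorem loop_invar (S : String) :
    pvGoA [] (pvLoopB S).toList = pvGoA [] S.toList := by
  induction S using pvLoopB.induct with
  | case1 S h ih =>
    rw [pvLoopB, if_pos h, ih]
    have hrep : (PySem.Str.replace S "abc" "").toList = pvRepl S.toList := by
      rw [PySem.Str.toList_replace,
        show ("abc".toList) = ['a', 'b', 'c'] from rfl,
        show ("".toList) = ([] : List Char) from rfl, replace_abc]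
    rw [hrep]
    have := go_repl S.toList.length S.toList le_rfl []
    simpa using this
  | case2 S h => rw [pvLoopB, if_neg h]

theorem loop_no_abc (S : String) :
    PySem.Str.isIn "abc" (pvLoopB S) = false := by
  induction S using pvLoopB.induct with
  | case1 S h ih => rw [pvLoopB, if_pos h]; exact ih
  | case2 S h => rw [pvLoopB, if_neg h]; simpa using h

theorem beq_empty_eq_isEmpty (T : String) : (T == "") = T.toList.isEmpty := by
  by_cases h : T = ""
  · subst h; rfl
  · have h1 : (T == "") = false := beq_eq_false_iff_ne.mpr h
    have h2 : T.toList ≠ [] := by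
      intro hl
      apply h
      have : T.toList = ("" : String).toList := by simpa using hl
      exact String.toList_injective this
    rw [h1]
    simp [h2]

-- ===== VERDICT (by name: the statement is the Claim_ definition above) =====
theorem valid_subs_spec : Claim_equal_valid_subs := by
  intro S _
  unfold Spec_valid_subs valid_subs valid_subs_alt
  rw [← loop_invar S, beq_empty_eq_isEmpty]
  have h3 : ¬ (['a', 'b', 'c'] <:+: (pvLoopB S).toList) := by
    intro hinf
    have : PySem.Str.isIn "abc" (pvLoopB S) = true :=
      (PySem.Str.isIn_iff_infix _ _).mpr (by
        rw [show ("abc".toList) = ['a', 'b', 'c'] from rfl]; exact hinf)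
    rw [loop_no_abc S] at this
    exact absurd this (by simp)
  have := go_no_abc (pvLoopB S).toList [] (by simpa using h3)
  simpa using this
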